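-- pv_equiv track=rewrite | github.com/imhonghong/GP_project | test_final.py | APM
-- ===== SOURCE A (Python) =====
-- def APM(classlist):
--     in_list=[]
--
--     for i in range(0,len(classlist),1):
--         in_list.insert(i,classlist[i])
--
--     new=1
--     convert_list=[]
--     convert_list.insert(0,[in_list[0],1])
--     for i in range(1,len(in_list),1):
--         for j in range(0,len(convert_list),1):
--             if(convert_list[j][0]==in_list[i]):
--                 convert_list[j][1]+=1
--                 new=0
--             else:
--                 new=new
--         if(new==1):
--             new=1
--             convert_list.insert(i,[in_list[i],1])
--         else:
--             new=1
--
--     max_num=convert_list[0][1]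
--     MAX=convert_list[0][0]
--     for i in range(0,len(convert_list),1):
--         if(max_num<convert_list[i][1]):
--             max_num=convert_list[i][1]
--             MAX=convert_list[i][0]
--         else:
--             MAX=MAX
--
--     return MAX
-- ===== SOURCE B (Python) =====
-- def APM(classlist):
--     return max(classlist, key=classlist.count)
-- ===== Notes on version B (the rewrite author's own statement) =====
-- stated objective: idiomatic
-- what changed: Replaced the hand-built association-list frequency table (nested index loops with a 'new' flag) and the manual max scan by the idiomatic one-liner max(classlist, key=classlist.count); the earliest-appearance tie-break is preserved because max keeps the first element attaining the maximal key.
import Mathlib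
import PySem

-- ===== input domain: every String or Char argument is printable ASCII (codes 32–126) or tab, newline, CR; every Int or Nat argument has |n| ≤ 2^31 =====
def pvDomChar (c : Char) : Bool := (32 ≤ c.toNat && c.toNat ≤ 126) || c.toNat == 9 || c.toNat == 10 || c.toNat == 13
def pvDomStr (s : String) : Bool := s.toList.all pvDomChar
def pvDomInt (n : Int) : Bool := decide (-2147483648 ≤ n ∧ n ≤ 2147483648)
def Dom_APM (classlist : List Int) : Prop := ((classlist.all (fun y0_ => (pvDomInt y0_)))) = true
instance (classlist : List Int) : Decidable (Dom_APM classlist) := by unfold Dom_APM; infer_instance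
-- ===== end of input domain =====

-- B replaces A's hand-built [value,count] table and manual max scan by Python's
-- max(classlist, key=classlist.count); same result, same earliest-appearance tie-break.

-- ===== PORT A =====
-- inner 'for j in range(0,len(convert_list),1)' loop: bump the matching count, record match in 'new'
def APM_inner (x : Int) (cl : List (Int × Int)) : List (Int × Int) × Int :=
  cl.foldl (fun acc p =>
    if p.1 == x then (acc.1 ++ [(p.1, p.2 + 1)], 0) else (acc.1 ++ [p], acc.2)) ([], 1)

-- outer 'for i in range(1,len(in_list),1)' loop, carrying the running index i
def APM_outer : List Int → Int → List (Int × Int) → List (Int × Int)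
  | [], _, cl => cl
  | x :: t, i, cl =>
    let r := APM_inner x cl
    APM_outer t (i + 1) (if r.2 == 1 then PySem.List.insert r.1 i (x, 1) else r.1)

def APM (classlist : List Int) : Int :=
  let in_list := (PySem.List.pyRange 0 (classlist.length : Int) 1).foldl
    (fun l i => PySem.List.insert l i (PySem.List.pyGetD classlist i 0)) []
  match in_list with
  | [] => 0  -- Python raises IndexError at in_list[0]; excluded by Pre_APM
  | h :: t =>
    let cl := APM_outer t 1 [(h, 1)]
    match cl with
    | [] => 0  -- unreachable: convert_list is never empty
    | c :: _ =>
      (cl.foldl (fun s p => if s.1 < p.2 then (p.2, p.1) else s) (c.2, c.1)).2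

-- ===== PORT B =====
-- max(classlist, key=classlist.count): keep current best, replace when key strictly larger
def APM_alt (classlist : List Int) : Int :=
  match classlist with
  | [] => 0  -- Python max raises ValueError on an empty sequence; excluded by Pre_APM
  | h :: t =>
    t.foldl (fun best x =>
      if PySem.List.count classlist best < PySem.List.count classlist x then x else best) h

-- ===== PRECONDITION & SPEC =====
-- Pre_ excludes only the empty list, on which A raises IndexError (and B ValueError).
def Pre_APM (classlist : List Int) : Prop := classlist ≠ []
instance (classlist : List Int) : Decidable (Pre_APM classlist) := by unfold Pre_APM; infer_instance
def pvWitness_APM : List Int := [3, 1, 3, 2]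

def Spec_APM (classlist : List Int) (out : Int) : Prop := out = APM_alt classlist
instance (classlist : List Int) (out : Int) : Decidable (Spec_APM classlist out) := by unfold Spec_APM; infer_instance

-- ===== CLAIM (what is proved, stated in full; the proofs are below) =====
def Claim_equal_APM : Prop := ∀ (classlist : List Int), Dom_APM classlist → Pre_APM classlist → Spec_APM classlist (APM classlist)


-- ===== LEMMAS AND PROOFS =====

-- first-occurrence deduplication with an explicit 'seen' accumulator
def foAux (seen : List Int) : List Int → List Int
  | [] => []
  | x :: t => if x ∈ seen then foAux seen t else x :: foAux (x :: seen) t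

-- the key both programs maximise: multiplicity in the full input list
def pvKey (l : List Int) (v : Int) : Int := (List.count v l : Int)

-- the argmax step shared by both reductions
def pvStep (l : List Int) (b x : Int) : Int := if pvKey l b < pvKey l x then x else b

-- the bump applied to every table entry by one pass of the inner loop
def pvBump (x : Int) (q : Int × Int) : Int × Int := if q.1 == x then (q.1, q.2 + 1) else q

-- A's table after processing prefix p
def pvTbl (p : List Int) : List (Int × Int) :=
  (foAux [] p).map (fun v => (v, (List.count v p : Int)))

theorem mem_foAux (v : Int) : ∀ (t seen : List Int), v ∈ foAux seen t ↔ v ∈ t ∧ v ∉ seen := by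
  intro t
  induction t with
  | nil => intro seen; simp [foAux]
  | cons x t ih =>
    intro seen
    by_cases hx : x ∈ seen
    · simp only [foAux, if_pos hx, ih, List.mem_cons]
      constructor
      · rintro ⟨h1, h2⟩; exact ⟨Or.inr h1, h2⟩
      · rintro ⟨h1, h2⟩
        rcases h1 with rfl | h1
        · exact absurd hx h2
        · exact ⟨h1, h2⟩
    · simp only [foAux, if_neg hx, ih, List.mem_cons]
      constructor
      · rintro (rfl | ⟨h1, h2⟩)
        · exact ⟨Or.inl rfl, hx⟩
        · exact ⟨Or.inr h1, fun hs => h2 (Or.inr hs)⟩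
      · rintro ⟨h1, h2⟩
        by_cases hv : v = x
        · exact Or.inl hv
        · rcases h1 with rfl | h1
          · exact Or.inl rfl
          · exact Or.inr ⟨h1, by simp [hv, h2]⟩

theorem length_foAux_le : ∀ (t seen : List Int), (foAux seen t).length ≤ t.length := by
  intro t
  induction t with
  | nil => intro seen; simp [foAux]
  | cons x t ih =>
    intro seen
    by_cases hx : x ∈ seen
    · simp only [foAux, if_pos hx, List.length_cons]
      exact Nat.le_succ_of_le (ih seen)
    · simp only [foAux, if_neg hx, List.length_cons]
      exact Nat.succ_le_succ (ih (x :: seen))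

theorem foAux_append (x : Int) : ∀ (p seen : List Int),
    foAux seen (p ++ [x]) =
      if x ∈ seen ∨ x ∈ p then foAux seen p else foAux seen p ++ [x] := by
  intro p
  induction p with
  | nil => intro seen; by_cases hx : x ∈ seen <;> simp [foAux, hx]
  | cons y p ih =>
    intro seen
    by_cases hy : y ∈ seen
    · simp only [List.cons_append, foAux, if_pos hy, ih]
      by_cases hxy : x = y
      · subst hxy; simp [hy]
      · simp [hxy]
    · simp only [List.cons_append, foAux, if_neg hy, ih]
      have hcond : (x ∈ y :: seen ∨ x ∈ p) ↔ (x ∈ seen ∨ x ∈ y :: p) := by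
        simp [List.mem_cons]; tauto
      by_cases hc : x ∈ seen ∨ x ∈ y :: p
      · rw [if_pos (hcond.mpr hc), if_pos hc]
      · rw [if_neg (fun h => hc (hcond.mp h)), if_neg hc]

theorem insert_ge {α : Type} (xs : List α) (v : α) (i : Int) (h : (xs.length : Int) ≤ i)
    (h0 : 0 ≤ i) : PySem.List.insert xs i v = xs ++ [v] := by
  obtain ⟨n, rfl⟩ := Int.eq_ofNat_of_zero_le h0
  have hn : xs.length ≤ n := by exact_mod_cast h
  simp only [PySem.List.insert, PySem.List.sliceIndices]
  have h1 : ¬((n : Int) < 0) := by omega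
  have h2 : min (n : Int) (xs.length : Int) = (xs.length : Int) := by omega
  simp [h1, h2, List.take_of_length_le, List.drop_eq_nil_of_le]

theorem inner_aux (x : Int) : ∀ (cl : List (Int × Int)) (a : List (Int × Int)) (n : Int),
    cl.foldl (fun acc p =>
        if p.1 == x then (acc.1 ++ [(p.1, p.2 + 1)], 0) else (acc.1 ++ [p], acc.2)) (a, n)
      = (a ++ cl.map (pvBump x), if cl.any (fun p => p.1 == x) then 0 else n) := by
  intro cl
  induction cl with
  | nil => intro a n; simp
  | cons p t ih =>
    intro a n
    rw [List.foldl_cons]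
    by_cases hp : (p.1 == x) = true
    · rw [if_pos hp, ih]
      have hb : pvBump x p = (p.1, p.2 + 1) := by simp [pvBump, hp]
      simp [hb, List.any_cons, hp]
    · rw [if_neg hp, ih]
      have hb : pvBump x p = p := by simp [pvBump]; intro hc; exact absurd (by simp [hc]) hp
      simp only [Bool.not_eq_true] at hp
      simp only [List.map_cons, hb, List.any_cons, hp, Bool.false_or]
      simp

theorem inner_spec (x : Int) (cl : List (Int × Int)) :
    APM_inner x cl = (cl.map (pvBump x), if cl.any (fun p => p.1 == x) then 0 else 1) := by
  unfold APM_inner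
  exact inner_aux x cl [] 1

theorem tbl_snoc (p : List Int) (x : Int) :
    pvTbl (p ++ [x]) =
      if x ∈ p then (pvTbl p).map (pvBump x)
      else (pvTbl p).map (pvBump x) ++ [(x, 1)] := by
  have hfo := foAux_append x p []
  simp only [List.mem_nil_iff, false_or] at hfo
  have hmap : ∀ q : List Int,
      q.map (fun v => (v, (List.count v (p ++ [x]) : Int)))
        = (q.map (fun v => (v, (List.count v p : Int)))).map (pvBump x) := by
    intro q
    rw [List.map_map]
    apply List.map_congr_left
    intro v _
    simp only [Function.comp, pvBump]
    by_cases hv : v = x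
    · subst hv; simp [List.count_append]
    · have : (v == x) = false := by simp [hv]
      simp [List.count_append, this, List.count_singleton]
      omega
  by_cases hx : x ∈ p
  · rw [if_pos hx]
    simp only [pvTbl, hfo, if_pos hx]
    exact hmap _
  · rw [if_neg hx]
    simp only [pvTbl, hfo, if_neg hx, List.map_append]
    rw [hmap]
    congr 1
    simp [List.count_append, List.count_eq_zero_of_not_mem hx]

theorem any_tbl (p : List Int) (x : Int) :
    (pvTbl p).any (fun q => q.1 == x) = decide (x ∈ p) := by
  simp only [pvTbl, List.any_map]
  have hcomp : ((fun q : Int × Int => q.1 == x) ∘ fun v => (v, (List.count v p : Int)))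
      = fun v => v == x := rfl
  rw [hcomp]
  by_cases hx : x ∈ p
  · simp only [hx, decide_true]
    rw [List.any_eq_true]
    exact ⟨x, (mem_foAux x p []).mpr ⟨hx, by simp⟩, by simp⟩
  · simp only [hx, decide_false]
    rw [List.any_eq_false]
    intro v hv
    simp only [beq_iff_eq]
    rintro rfl
    exact hx ((mem_foAux v p []).mp hv).1

theorem outer_spec : ∀ (t p : List Int), p ≠ [] →
    APM_outer t (p.length : Int) (pvTbl p) = pvTbl (p ++ t) := by
  intro t
  induction t with
  | nil => intro p _; simp [APM_outer]
  | cons x t ih =>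
    intro p hp
    have hlen : ((foAux [] p).map (fun v => (v, (List.count v p : Int)))).length ≤ p.length := by
      simpa using length_foAux_le p []
    simp only [APM_outer, inner_spec, any_tbl]
    by_cases hx : x ∈ p
    · simp only [hx, decide_true]
      norm_num
      have h1 : (pvTbl p).map (pvBump x) = pvTbl (p ++ [x]) := by rw [tbl_snoc, if_pos hx]
      rw [h1]
      have h2 : (p.length : Int) + 1 = ((p ++ [x]).length : Int) := by simp
      rw [h2, ih (p ++ [x]) (by simp)]
      simp
    · simp only [hx, decide_false]
      norm_num
      have h1 : PySem.List.insert ((pvTbl p).map (pvBump x)) (p.length : Int) (x, 1)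
          = (pvTbl p).map (pvBump x) ++ [(x, 1)] := by
        apply insert_ge
        · simpa [pvTbl] using Int.ofNat_le.mpr hlen
        · exact Int.natCast_nonneg _
      rw [h1]
      have h2 : (pvTbl p).map (pvBump x) ++ [(x, 1)] = pvTbl (p ++ [x]) := by
        rw [tbl_snoc, if_neg hx]
      rw [h2]
      have h3 : (p.length : Int) + 1 = ((p ++ [x]).length : Int) := by simp
      rw [h3, ih (p ++ [x]) (by simp)]
      simp

theorem in_list_aux (classlist : List Int) : ∀ (n : Nat), n ≤ classlist.length →
    (PySem.List.pyRange 0 (n : Int) 1).foldl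
      (fun l i => PySem.List.insert l i (PySem.List.pyGetD classlist i 0)) []
    = classlist.take n := by
  intro n
  induction n with
  | zero => intro _; simp [PySem.List.pyRange]
  | succ n ih =>
    intro hn
    have hn' : n ≤ classlist.length := Nat.le_of_succ_le hn
    have hlt : n < classlist.length := hn
    have hr : PySem.List.pyRange 0 ((n + 1 : Nat) : Int)
        = PySem.List.pyRange 0 (n : Int) ++ [(n : Int)] := by
      rw [PySem.List.pyRange_one_append 0 (n : Int) ((n + 1 : Nat) : Int) (by omega)
        (by push_cast; omega)]
      congr 1
      rw [PySem.List.pyRange_one_cons (by push_cast; omega)]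
      simp [PySem.List.pyRange]
    rw [hr, List.foldl_append, ih hn']
    simp only [List.foldl_cons, List.foldl_nil]
    rw [PySem.List.insert_natCast _ n _ (by simpa using hn')]
    rw [PySem.List.pyGetD_natCast]
    have e1 : List.take n (List.take n classlist) = List.take n classlist := by
      simp [List.take_take]
    have e2 : List.drop n (List.take n classlist) = [] := by
      apply List.drop_eq_nil_of_le; simp
    rw [e1, e2, List.take_add_one]
    simp [List.getElem?_eq_getElem hlt]

theorem in_list_eq (classlist : List Int) :
    (PySem.List.pyRange 0 (classlist.length : Int) 1).foldl
      (fun l i => PySem.List.insert l i (PySem.List.pyGetD classlist i 0)) [] = classlist := by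
  simpa using in_list_aux classlist classlist.length le_rfl

theorem scan_spec (l : List Int) : ∀ (vs : List Int) (b : Int),
    (vs.map (fun v => (v, pvKey l v))).foldl
        (fun s p => if s.1 < p.2 then (p.2, p.1) else s) (pvKey l b, b)
      = (pvKey l (vs.foldl (pvStep l) b), vs.foldl (pvStep l) b) := by
  intro vs
  induction vs with
  | nil => intro b; simp
  | cons v t ih =>
    intro b
    have hstep : (if pvKey l b < pvKey l v then (pvKey l v, v) else (pvKey l b, b))
        = (pvKey l (pvStep l b v), pvStep l b v) := by
      simp only [pvStep]; split_ifs <;> rfl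
    simp only [List.map_cons, List.foldl_cons, hstep, ih]

theorem dedup_fold (l : List Int) : ∀ (t seen : List Int) (b : Int),
    (∀ s ∈ seen, pvKey l s ≤ pvKey l b) →
    (foAux seen t).foldl (pvStep l) b = t.foldl (pvStep l) b := by
  intro t
  induction t with
  | nil => intro seen b _; simp [foAux]
  | cons x t ih =>
    intro seen b hb
    by_cases hx : x ∈ seen
    · have hbx : pvStep l b x = b := by
        simp only [pvStep]
        rw [if_neg (not_lt.mpr (hb x hx))]
      simp only [foAux, if_pos hx, List.foldl_cons, hbx]
      exact ih seen b hb
    · simp only [foAux, if_neg hx, List.foldl_cons]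
      apply ih (x :: seen) (pvStep l b x)
      intro s hs
      rcases List.mem_cons.mp hs with rfl | hs
      · simp only [pvStep]; split_ifs with h <;> omega
      · have := hb s hs
        simp only [pvStep]; split_ifs with h <;> omega

theorem foAux_full (h : Int) (t : List Int) : foAux [] (h :: t) = h :: foAux [h] t := by
  simp [foAux]

theorem alt_eq_fold (h : Int) (t : List Int) :
    APM_alt (h :: t) = t.foldl (pvStep (h :: t)) h := by
  simp only [APM_alt]
  congr 1
  funext best x
  simp only [pvStep, pvKey, PySem.List.count_eq]
  split_ifs with h1 h2 h2 <;> first | rfl | (exfalso; omega)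

-- ===== VERDICT (by name: the statement is the Claim_ definition above) =====
theorem APM_spec : Claim_equal_APM := by
  intro classlist _ hpre
  unfold Spec_APM
  cases classlist with
  | nil => exact absurd rfl hpre
  | cons h t =>
    have hstart : [((h : Int), (1 : Int))] = pvTbl [h] := by
      simp [pvTbl, foAux]
    have houter : APM_outer t 1 (pvTbl [h]) = pvTbl (h :: t) := by
      have := outer_spec t [h] (by simp)
      simpa using this
    have hcl : pvTbl (h :: t) = ((h :: foAux [h] t).map (fun v => (v, pvKey (h :: t) v))) := by
      simp [pvTbl, foAux_full, pvKey]
    have hAPM : APM (h :: t) = (h :: foAux [h] t).foldl (pvStep (h :: t)) h := by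
      simp only [APM, in_list_eq]
      rw [hstart, houter, hcl]
      have hs := scan_spec (h :: t) (h :: foAux [h] t) h
      simp only [List.map_cons] at hs ⊢
      rw [hs]
    have hh : pvStep (h :: t) h h = h := by simp [pvStep]
    rw [hAPM, alt_eq_fold]
    simp only [List.foldl_cons, hh]
    exact dedup_fold (h :: t) t [h] h
      (by intro s hs; simp at hs; subst hs; exact le_rfl)
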